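-- pv_equiv track=rewrite | github.com/DesalegnTamirat/A2SV-Code-Submission | camp/leetcode/all-divisions-with-the-highest-score-of-a-binary-array.py | maxScoreIndices
-- ===== SOURCE A (Python) =====
-- from typing import List
--
-- def maxScoreIndices(nums: List[int]) -> List[int]:
--     ans = []
--     ones = 0
--     # counting how many ones are there to the right
--     for num in nums:
--         if num == 1:
--             ones += 1
--
--     highest_score = ones
--     ans = [0]
--     zeros = 0
--     for i, num in enumerate(nums):
--         # enumerating and decreasing one and increasing zero
--         if num == 0:
--             zeros += 1
--         else:
--             ones -= 1
--
--         #calculating the score and comparing with the highest so far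
--         score = zeros + ones
--         if score == highest_score:
--             ans.append(i + 1)
--         elif score > highest_score:
--             ans = [i + 1]
--             highest_score = score
--
--     return ans
-- ===== SOURCE B (Python) =====
-- def maxScoreIndices(nums):
--     # Backward delta scan: splitting one step further left changes the score by
--     # -1 if that element is 0 (it leaves the zero-prefix) and +1 otherwise, so the
--     # relative scores need no zeros/ones counters; argmax is shift-invariant.
--     rel = [0]
--     t = 0
--     for x in reversed(nums):
--         t += -1 if x == 0 else 1
--         rel.append(t)
--     rel.reverse()
--     best = max(rel)
--     return [i for i, v in enumerate(rel) if v == best]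
-- ===== Notes on version B (the rewrite author's own statement) =====
-- stated objective: alternative
-- what changed: B replaces A's zeros/ones counters and inline running-best with a backward delta scan: it builds relative split scores right-to-left from the +/-1 score differences (no ones pre-count, no zeros counter), exploiting that argmax is invariant under the constant shift, then selects max-and-filter.
import Mathlib
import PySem

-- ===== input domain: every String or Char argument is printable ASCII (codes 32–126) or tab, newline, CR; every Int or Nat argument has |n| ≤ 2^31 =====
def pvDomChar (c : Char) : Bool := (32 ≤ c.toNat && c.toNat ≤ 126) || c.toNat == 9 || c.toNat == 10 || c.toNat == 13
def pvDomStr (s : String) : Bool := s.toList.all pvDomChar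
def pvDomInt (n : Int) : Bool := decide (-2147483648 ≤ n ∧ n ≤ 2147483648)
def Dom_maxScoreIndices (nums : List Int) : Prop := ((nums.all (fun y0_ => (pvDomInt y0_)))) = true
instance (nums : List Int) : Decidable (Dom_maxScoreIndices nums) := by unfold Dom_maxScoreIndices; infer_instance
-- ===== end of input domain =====

-- B drops A's zeros/ones counters entirely: it builds relative split scores by a backward
-- ±1 delta scan and selects max-and-filter, using that argmax is shift-invariant (alternative).


-- ===== PORT A =====
def maxScoreIndices (nums : List Int) : List Int :=
  let ones : Int := nums.foldl (fun o num => if num = 1 then o + 1 else o) 0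
  let st := (PySem.List.enumerate nums 0).foldl
    (fun (s : List Int × Int × Int × Int) (p : Int × Int) =>
      if (if p.2 = 0 then s.2.2.1 + 1 else s.2.2.1) + (if p.2 = 0 then s.2.2.2 else s.2.2.2 - 1) = s.2.1 then
        (s.1 ++ [p.1 + 1], s.2.1,
          (if p.2 = 0 then s.2.2.1 + 1 else s.2.2.1), (if p.2 = 0 then s.2.2.2 else s.2.2.2 - 1))
      else if s.2.1 < (if p.2 = 0 then s.2.2.1 + 1 else s.2.2.1) + (if p.2 = 0 then s.2.2.2 else s.2.2.2 - 1) then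
        ([p.1 + 1], (if p.2 = 0 then s.2.2.1 + 1 else s.2.2.1) + (if p.2 = 0 then s.2.2.2 else s.2.2.2 - 1),
          (if p.2 = 0 then s.2.2.1 + 1 else s.2.2.1), (if p.2 = 0 then s.2.2.2 else s.2.2.2 - 1))
      else
        (s.1, s.2.1,
          (if p.2 = 0 then s.2.2.1 + 1 else s.2.2.1), (if p.2 = 0 then s.2.2.2 else s.2.2.2 - 1)))
    ([0], ones, 0, ones)
  st.1

-- ===== PORT B =====
def maxScoreIndices_alt (nums : List Int) : List Int :=
  let st := nums.reverse.foldl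
    (fun (s : Int × List Int) x =>
      (s.1 + (if x = 0 then -1 else 1), s.2 ++ [s.1 + (if x = 0 then -1 else 1)]))
    (0, [0])
  let rel := st.2.reverse
  let best := (PySem.List.max? rel (fun y => y)).getD 0
  (PySem.List.enumerate rel 0).filterMap (fun p => if p.2 = best then some p.1 else none)

-- ===== PRECONDITION & SPEC =====
def Spec_maxScoreIndices (nums : List Int) (out : List Int) : Prop := out = maxScoreIndices_alt nums
instance (nums : List Int) (out : List Int) : Decidable (Spec_maxScoreIndices nums out) := by unfold Spec_maxScoreIndices; infer_instance

-- ===== CLAIM (what is proved, stated in full; the proofs are below) =====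
def Claim_equal_maxScoreIndices : Prop := ∀ (nums : List Int), Dom_maxScoreIndices nums → Spec_maxScoreIndices nums (maxScoreIndices nums)

-- ===== LEMMAS AND PROOFS =====

/-- The sequence of split scores past the initial one, from counters (zeros, ones). -/
def scoresFrom (z o : Int) : List Int → List Int
  | [] => []
  | x :: xs =>
    ((if x = 0 then z + 1 else z) + (if x = 0 then o else o - 1)) ::
      scoresFrom (if x = 0 then z + 1 else z) (if x = 0 then o else o - 1) xs

/-- Indices (starting at k) of the entries equal to m. -/
def idxEq (k m : Int) : List Int → List Int
  | [] => []
  | s :: rest => if s = m then k :: idxEq (k + 1) m rest else idxEq (k + 1) m rest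

/-- B's relative score list: rel(n) = 0 and rel(i) = rel(i+1) + (-1 if nums[i] = 0 else 1). -/
def relOf : List Int → List Int
  | [] => [0]
  | x :: xs => ((if x = 0 then -1 else 1) + (relOf xs).headI) :: relOf xs

/-- The value of z + o after A's counters consume the whole list. -/
def lastScore (z o : Int) : List Int → Int
  | [] => z + o
  | x :: xs => lastScore (if x = 0 then z + 1 else z) (if x = 0 then o else o - 1) xs

lemma relOf_ne_nil (l : List Int) : relOf l ≠ [] := by
  cases l <;> simp [relOf]

/-- Invariant for A's loop: its answer list is the (possibly reset) old answers followed by the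
    indices where the remaining score stream attains the final running maximum. -/
lemma A_fold (nums : List Int) : ∀ (k : Int) (ans : List Int) (hs z o : Int),
    ((PySem.List.enumerate nums k).foldl
      (fun (s : List Int × Int × Int × Int) (p : Int × Int) =>
        if (if p.2 = 0 then s.2.2.1 + 1 else s.2.2.1) + (if p.2 = 0 then s.2.2.2 else s.2.2.2 - 1) = s.2.1 then
          (s.1 ++ [p.1 + 1], s.2.1,
            (if p.2 = 0 then s.2.2.1 + 1 else s.2.2.1), (if p.2 = 0 then s.2.2.2 else s.2.2.2 - 1))
        else if s.2.1 < (if p.2 = 0 then s.2.2.1 + 1 else s.2.2.1) + (if p.2 = 0 then s.2.2.2 else s.2.2.2 - 1) then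
          ([p.1 + 1], (if p.2 = 0 then s.2.2.1 + 1 else s.2.2.1) + (if p.2 = 0 then s.2.2.2 else s.2.2.2 - 1),
            (if p.2 = 0 then s.2.2.1 + 1 else s.2.2.1), (if p.2 = 0 then s.2.2.2 else s.2.2.2 - 1))
        else
          (s.1, s.2.1,
            (if p.2 = 0 then s.2.2.1 + 1 else s.2.2.1), (if p.2 = 0 then s.2.2.2 else s.2.2.2 - 1)))
      (ans, hs, z, o)).1 =
    (if (scoresFrom z o nums).foldl max hs = hs then ans else []) ++
      idxEq (k + 1) ((scoresFrom z o nums).foldl max hs) (scoresFrom z o nums) := by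
  induction nums with
  | nil => intro k ans hs z o; simp [scoresFrom, idxEq, PySem.List.enumerate]
  | cons x xs ih =>
    intro k ans hs z o
    rw [PySem.List.enumerate_cons, scoresFrom]
    simp only [List.foldl_cons]
    set z' := if x = 0 then z + 1 else z with hz'
    set o' := if x = 0 then o else o - 1 with ho'
    by_cases hsc : z' + o' = hs
    · rw [if_pos hsc, ih]
      simp only [hsc, max_self]
      by_cases hM : (scoresFrom z' o' xs).foldl max hs = hs
      · rw [if_pos hM, if_pos hM, idxEq, if_pos hM.symm, List.append_assoc]
        simp
      · rw [if_neg hM, if_neg hM, idxEq, if_neg (fun h => hM h.symm)]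
    · rw [if_neg hsc]
      by_cases hgt : hs < z' + o'
      · rw [if_pos hgt, ih]
        simp only [max_eq_right (le_of_lt hgt)]
        have hge : z' + o' ≤ (scoresFrom z' o' xs).foldl max (z' + o') :=
          (PySem.List.le_foldl_max (scoresFrom z' o' xs) (z' + o')).1
        have hMne : (scoresFrom z' o' xs).foldl max (z' + o') ≠ hs := by omega
        rw [if_neg hMne, idxEq]
        by_cases hM : (scoresFrom z' o' xs).foldl max (z' + o') = z' + o'
        · rw [if_pos hM, if_pos hM.symm]
          simp
        · rw [if_neg hM, if_neg (fun h => hM h.symm)]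
      · rw [if_neg hgt, ih]
        simp only [max_eq_left (by omega : z' + o' ≤ hs)]
        have hge : hs ≤ (scoresFrom z' o' xs).foldl max hs :=
          (PySem.List.le_foldl_max (scoresFrom z' o' xs) hs).1
        rw [idxEq, if_neg (by omega : ¬ z' + o' = (scoresFrom z' o' xs).foldl max hs)]

/-- B's backward fold computes (headI (relOf nums), (relOf nums).reverse). -/
lemma B_fold (nums : List Int) :
    (nums.reverse.foldl
      (fun (s : Int × List Int) x =>
        (s.1 + (if x = 0 then -1 else 1), s.2 ++ [s.1 + (if x = 0 then -1 else 1)]))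
      (0, [0])) = ((relOf nums).headI, (relOf nums).reverse) := by
  induction nums with
  | nil => simp [relOf]
  | cons x xs ih =>
    simp only [List.reverse_cons, List.foldl_append, List.foldl_cons, List.foldl_nil, ih, relOf]
    simp [Int.add_comm]

/-- A's full score list is B's relative score list shifted by the final score. -/
lemma scores_shift : ∀ (l : List Int) (z o : Int),
    (z + o) :: scoresFrom z o l = (relOf l).map (· + lastScore z o l) := by
  intro l
  induction l with
  | nil => intro z o; simp [scoresFrom, relOf, lastScore]
  | cons x xs ih =>
    intro z o
    set z' := if x = 0 then z + 1 else z with hz'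
    set o' := if x = 0 then o else o - 1 with ho'
    have hxs := ih z' o'
    have hL : lastScore z o (x :: xs) = lastScore z' o' xs := rfl
    rw [scoresFrom, relOf, List.map_cons, hL, ← hxs]
    have hhead : ((relOf xs).map (· + lastScore z' o' xs)).headI = z' + o' := by
      rw [← hxs]; rfl
    have hh : (relOf xs).headI + lastScore z' o' xs = z' + o' := by
      obtain ⟨a, t, hat⟩ : ∃ a t, relOf xs = a :: t := by
        cases hre : relOf xs with
        | nil => exact absurd hre (relOf_ne_nil xs)
        | cons a t => exact ⟨a, t, rfl⟩
      rw [hat] at hhead ⊢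
      simpa using hhead
    congr 1
    have : z + o = z' + o' + (if x = 0 then -1 else 1) := by
      simp only [hz', ho']; split_ifs <;> ring
    omega

/-- Running max commutes with a constant shift. -/
lemma foldl_max_shift (c : Int) : ∀ (t : List Int) (a : Int),
    (t.map (· + c)).foldl max (a + c) = t.foldl max a + c := by
  intro t
  induction t with
  | nil => intro a; simp
  | cons x xs ih =>
    intro a
    simp only [List.map_cons, List.foldl_cons]
    rw [max_add_add_right]
    exact ih (max a x)

/-- idxEq is invariant under shifting both the target and the entries. -/
lemma idxEq_shift (c : Int) : ∀ (l : List Int) (k m : Int),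
    idxEq k (m + c) (l.map (· + c)) = idxEq k m l := by
  intro l
  induction l with
  | nil => intro k m; simp [idxEq]
  | cons s rest ih =>
    intro k m
    simp only [List.map_cons, idxEq, ih]
    by_cases h : s = m
    · rw [if_pos (by omega), if_pos h]
    · rw [if_neg (by omega), if_neg h]

/-- B's filtering pass over the enumerated table is idxEq (generalized start). -/
lemma B_filter_aux (best : Int) (l : List Int) : ∀ (k : Int),
    (PySem.List.enumerate l k).filterMap (fun p => if p.2 = best then some p.1 else none) =
      idxEq k best l := by
  induction l with
  | nil => intro k; simp [idxEq, PySem.List.enumerate]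
  | cons s rest ih =>
    intro k
    rw [PySem.List.enumerate_cons, List.filterMap_cons, idxEq]
    by_cases h : s = best
    · rw [if_pos h]
      simp only [if_pos h, ih]
    · rw [if_neg h]
      simp only [if_neg h, ih]

/-- max with no key on a nonempty list is the running-max loop. -/
lemma getD_max?_cons (x : Int) (t : List Int) :
    (PySem.List.max? (x :: t) (fun y => y)).getD 0 = t.foldl max x := by
  rw [PySem.List.max?_id_cons]; rfl

-- ===== VERDICT (by name: the statement is the Claim_ definition above) =====
theorem maxScoreIndices_spec : Claim_equal_maxScoreIndices := by
  intro nums _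
  unfold Spec_maxScoreIndices maxScoreIndices maxScoreIndices_alt
  simp only [B_fold, List.reverse_reverse]
  set ones : Int := nums.foldl (fun o num => if num = 1 then o + 1 else o) 0 with hones
  rw [A_fold]
  obtain ⟨a, t, hat⟩ : ∃ a t, relOf nums = a :: t := by
    cases hre : relOf nums with
    | nil => exact absurd hre (relOf_ne_nil nums)
    | cons a t => exact ⟨a, t, rfl⟩
  have hshift := scores_shift nums 0 ones
  rw [hat] at hshift ⊢
  rw [getD_max?_cons, B_filter_aux]
  set L := lastScore 0 ones nums with hLdef
  have hhead : (0 : Int) + ones = a + L := by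
    have := congrArg List.headI hshift; simpa using this
  have htail : scoresFrom 0 ones nums = t.map (· + L) := by
    have := congrArg List.tail hshift; simpa using this
  have hM : (scoresFrom 0 ones nums).foldl max ones = t.foldl max a + L := by
    rw [htail]
    have : ones = a + L := by omega
    rw [this, foldl_max_shift]
  rw [hM, htail]
  have hidx : idxEq 1 (t.foldl max a + L) (t.map (· + L)) = idxEq 1 (t.foldl max a) t :=
    idxEq_shift L t 1 (t.foldl max a)
  simp only [zero_add]
  rw [hidx, idxEq]
  by_cases h : a = t.foldl max a
  · rw [if_pos (by omega : t.foldl max a + L = ones), if_pos h]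
    simp
  · rw [if_neg (by omega : ¬ t.foldl max a + L = ones), if_neg h]
    simp
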